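-- pv_equiv track=rewrite | github.com/schummax/MapVis | build/lib/mapvis/utils.py | sort_mappings_by_presence
-- ===== SOURCE A (Python) =====
-- from typing import Dict, List, Tuple
--
-- def sort_mappings_by_presence(consensus_map: Dict[str, Tuple[List[str], List[str]]]) -> List[str]:
--     """
--     Sort consensus labels by presence in both datasets.
--
--     Mappings present in both datasets come first, followed by those in only one dataset.
--
--     Args:
--         consensus_map: Dictionary from get_consensus_mapping
--
--     Returns:
--         Sorted list of consensus labels
--     """
--     both_datasets = []
--     one_dataset = []
--
--     for consensus, (d1_labels, d2_labels) in consensus_map.items():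
--         if d1_labels and d2_labels:
--             both_datasets.append(consensus)
--         else:
--             one_dataset.append(consensus)
--
--     # Sort each group alphabetically
--     both_datasets.sort()
--     one_dataset.sort()
--
--     return both_datasets + one_dataset
-- ===== SOURCE B (Python) =====
-- def sort_mappings_by_presence(consensus_map):
--     """Single stable sort with a composite (presence, label) key instead of
--     partitioning into two lists, sorting each, and concatenating."""
--     ordered = sorted(
--         consensus_map.items(),
--         key=lambda item: (not (item[1][0] and item[1][1]), item[0]),
--     )
--     return [consensus for consensus, _ in ordered]
-- ===== Notes on version B (the rewrite author's own statement) =====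
-- stated objective: idiomatic
-- what changed: One stable sort of the dict items under the composite key (not (d1 and d2), label) replaces A's explicit two-list partition loop, two separate sorts and concatenation.
import Mathlib
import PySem

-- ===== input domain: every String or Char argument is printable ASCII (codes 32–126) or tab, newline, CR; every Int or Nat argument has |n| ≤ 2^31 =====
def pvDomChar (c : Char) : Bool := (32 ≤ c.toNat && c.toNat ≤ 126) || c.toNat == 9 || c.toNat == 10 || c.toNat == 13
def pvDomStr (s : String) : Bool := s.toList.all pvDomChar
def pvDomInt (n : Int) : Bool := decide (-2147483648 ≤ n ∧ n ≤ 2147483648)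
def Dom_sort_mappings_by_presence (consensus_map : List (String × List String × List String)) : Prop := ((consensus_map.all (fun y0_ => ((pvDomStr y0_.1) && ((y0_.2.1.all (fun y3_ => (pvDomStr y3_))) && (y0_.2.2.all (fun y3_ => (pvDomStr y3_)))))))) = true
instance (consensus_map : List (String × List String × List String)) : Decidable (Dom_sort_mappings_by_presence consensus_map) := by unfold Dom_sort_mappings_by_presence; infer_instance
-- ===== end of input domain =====

-- B replaces A's two-list partition + two sorts + concatenation with ONE stable sort
-- of the items under the composite key (not(d1 and d2), label); equal return value, same cost.

-- ===== PORT A =====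
def sort_mappings_by_presence (consensus_map : List (String × List String × List String)) : List String :=
  -- one loop appending each label to both_datasets or one_dataset, then sort each, then concatenate
  let st := consensus_map.foldl
    (fun (acc : List String × List String) p =>
      if !p.2.1.isEmpty && !p.2.2.isEmpty then (acc.1 ++ [p.1], acc.2)
      else (acc.1, acc.2 ++ [p.1])) ([], [])
  PySem.List.sorted st.1 (fun s => s) false ++ PySem.List.sorted st.2 (fun s => s) false

-- ===== PORT B =====
def sort_mappings_by_presence_alt (consensus_map : List (String × List String × List String)) : List String :=
  -- sorted(consensus_map.items(), key=lambda item: (not (item[1][0] and item[1][1]), item[0]))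
  let ordered := PySem.List.sorted2 consensus_map
    (fun item => !(!item.2.1.isEmpty && !item.2.2.isEmpty)) (fun item => item.1) false
  ordered.map (fun p => p.1)

-- ===== PRECONDITION & SPEC =====
def Spec_sort_mappings_by_presence (consensus_map : List (String × List String × List String)) (out : List String) : Prop := out = sort_mappings_by_presence_alt consensus_map
instance (consensus_map : List (String × List String × List String)) (out : List String) : Decidable (Spec_sort_mappings_by_presence consensus_map out) := by unfold Spec_sort_mappings_by_presence; infer_instance

-- ===== CLAIM (what is proved, stated in full; the proofs are below) =====
def Claim_equal_sort_mappings_by_presence : Prop := ∀ (consensus_map : List (String × List String × List String)), Dom_sort_mappings_by_presence consensus_map → Spec_sort_mappings_by_presence consensus_map (sort_mappings_by_presence consensus_map)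

-- ===== LEMMAS AND PROOFS =====

-- abbreviations for the proof: the presence key, the per-label comparison, the composite comparison
def pvG (p : String × List String × List String) : Bool := !(!p.2.1.isEmpty && !p.2.2.isEmpty)
def pvLt1 (a b : String × List String × List String) : Bool := decide (a.1 < b.1)
def pvLt2 (a b : String × List String × List String) : Bool :=
  decide (pvG a < pvG b) || !decide (pvG b < pvG a) && decide (a.1 < b.1)

theorem pv_insertBy_congr {α : Type} (b1 b2 : α → α → Bool) (x : α) (l : List α)
    (h : ∀ y ∈ l, b1 x y = b2 x y) :
    PySem.List.insertBy b1 x l = PySem.List.insertBy b2 x l := by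
  induction l with
  | nil => rfl
  | cons y ys ih =>
    simp only [PySem.List.insertBy, h y (List.mem_cons_self)]
    split
    · rfl
    · rw [ih (fun z hz => h z (List.mem_cons_of_mem _ hz))]

theorem pvLt2_eq_of_eqG {a b : String × List String × List String}
    (h : pvG a = pvG b) : pvLt2 a b = pvLt1 a b := by
  unfold pvLt2 pvLt1
  rw [h]
  cases pvG b <;> simp

theorem pvLt2_true {a b : String × List String × List String}
    (ha : pvG a = false) (hb : pvG b = true) : pvLt2 a b = true := by
  simp [pvLt2, ha, hb]

theorem pvLt2_false {a b : String × List String × List String}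
    (ha : pvG a = true) (hb : pvG b = false) : pvLt2 a b = false := by
  simp [pvLt2, ha, hb]

-- inserting into a (false-group ++ true-group) list inserts into the matching group
theorem pv_ins_split (x : String × List String × List String)
    (L R : List (String × List String × List String))
    (hL : ∀ y ∈ L, pvG y = false) (hR : ∀ y ∈ R, pvG y = true) :
    PySem.List.insertBy pvLt2 x (L ++ R) =
      if pvG x then L ++ PySem.List.insertBy pvLt1 x R
      else PySem.List.insertBy pvLt1 x L ++ R := by
  cases hx : pvG x with
  | false =>
    rw [if_neg Bool.false_ne_true]
    induction L with
    | nil =>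
      cases R with
      | nil => rfl
      | cons y ys =>
        simp [PySem.List.insertBy, pvLt2_true hx (hR y (List.mem_cons_self))]
    | cons y L' ih =>
      have hy := hL y (List.mem_cons_self)
      have h12 : pvLt2 x y = pvLt1 x y := pvLt2_eq_of_eqG (hx.trans hy.symm)
      simp only [List.cons_append, PySem.List.insertBy, h12]
      split
      · rfl
      · rw [ih (fun z hz => hL z (List.mem_cons_of_mem _ hz)), List.cons_append]
  | true =>
    rw [if_pos rfl]
    induction L with
    | nil =>
      simp only [List.nil_append]
      exact pv_insertBy_congr _ _ _ _
        (fun y hy => by rw [pvLt2_eq_of_eqG (hx.trans (hR y hy).symm)])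
    | cons y L' ih =>
      have hy := hL y (List.mem_cons_self)
      simp only [List.cons_append, PySem.List.insertBy, pvLt2_false hx hy,
        Bool.false_eq_true, if_false]
      rw [ih (fun z hz => hL z (List.mem_cons_of_mem _ hz))]

-- the composite-key insertion sort, started from a split accumulator, stays split
theorem pv_main (xs L R : List (String × List String × List String))
    (hL : ∀ y ∈ L, pvG y = false) (hR : ∀ y ∈ R, pvG y = true) :
    xs.foldl (fun acc x => PySem.List.insertBy pvLt2 x acc) (L ++ R) =
      ((xs.filter (fun x => !pvG x)).foldl
        (fun acc x => PySem.List.insertBy pvLt1 x acc) L) ++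
      ((xs.filter pvG).foldl
        (fun acc x => PySem.List.insertBy pvLt1 x acc) R) := by
  induction xs generalizing L R with
  | nil => rfl
  | cons x xs ih =>
    simp only [List.foldl_cons, pv_ins_split x L R hL hR, List.filter_cons]
    cases hx : pvG x with
    | false =>
      rw [if_neg Bool.false_ne_true]
      simp only [Bool.not_false, Bool.false_eq_true, if_false]
      exact ih _ _ (fun y hy => by
        rcases (PySem.List.mem_insertBy _ _ _ _).1 hy with h | h
        · exact h ▸ hx
        · exact hL y h) hR
    | true =>
      rw [if_pos rfl]
      simp only [Bool.not_true, Bool.false_eq_true, if_false]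
      exact ih _ _ hL (fun y hy => by
        rcases (PySem.List.mem_insertBy _ _ _ _).1 hy with h | h
        · exact h ▸ hx
        · exact hR y h)

-- mapping fst commutes with insertion by the label comparison
theorem pv_map_insertBy (x : String × List String × List String)
    (l : List (String × List String × List String)) :
    (PySem.List.insertBy pvLt1 x l).map Prod.fst =
      PySem.List.insertBy (fun a b => decide (a < b)) x.1 (l.map Prod.fst) := by
  induction l with
  | nil => rfl
  | cons y ys ih =>
    simp only [PySem.List.insertBy, List.map_cons, pvLt1]
    split
    · simp
    · simp [ih]

theorem pv_map_foldl (xs l : List (String × List String × List String)) :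
    (xs.foldl (fun acc x => PySem.List.insertBy pvLt1 x acc) l).map Prod.fst =
      (xs.map Prod.fst).foldl
        (fun acc s => PySem.List.insertBy (fun a b => decide (a < b)) s acc)
        (l.map Prod.fst) := by
  induction xs generalizing l with
  | nil => rfl
  | cons x xs ih => simp only [List.foldl_cons, List.map_cons, ih, pv_map_insertBy]

-- A's one partition loop computes the two filters
theorem pv_pairfold (xs : List (String × List String × List String)) (b o : List String) :
    xs.foldl
      (fun (acc : List String × List String) p =>
        if !p.2.1.isEmpty && !p.2.2.isEmpty then (acc.1 ++ [p.1], acc.2)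
        else (acc.1, acc.2 ++ [p.1])) (b, o) =
      (b ++ (xs.filter (fun p => !pvG p)).map Prod.fst,
       o ++ (xs.filter pvG).map Prod.fst) := by
  induction xs generalizing b o with
  | nil => simp
  | cons x xs ih =>
    simp only [List.foldl_cons, List.filter_cons]
    cases hc : (!x.2.1.isEmpty && !x.2.2.isEmpty) with
    | true =>
      have hg : pvG x = false := by simp [pvG, hc]
      simp only [hg, Bool.not_false]
      rw [ih]
      simp [List.append_assoc]
    | false =>
      have hg : pvG x = true := by simp [pvG, hc]
      simp only [hg, Bool.not_true, Bool.false_eq_true, if_false]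
      rw [ih]
      simp [List.append_assoc]

-- ===== VERDICT (by name: the statement is the Claim_ definition above) =====
theorem sort_mappings_by_presence_spec : Claim_equal_sort_mappings_by_presence := by
  intro cm _
  unfold Spec_sort_mappings_by_presence sort_mappings_by_presence sort_mappings_by_presence_alt
  simp only [PySem.List.sorted, PySem.List.sorted2, if_neg (by decide : ¬ false = true)]
  rw [pv_pairfold]
  simp only [List.nil_append]
  have hmain := pv_main cm [] [] (by simp) (by simp)
  simp only [List.nil_append] at hmain
  rw [show (fun acc x => PySem.List.insertBy
        (fun a b =>
          decide ((fun item => !(!item.2.1.isEmpty && !item.2.2.isEmpty)) a <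
              (fun item => !(!item.2.1.isEmpty && !item.2.2.isEmpty)) b) ||
            !decide ((fun item => !(!item.2.1.isEmpty && !item.2.2.isEmpty)) b <
                (fun item => !(!item.2.1.isEmpty && !item.2.2.isEmpty)) a) &&
              decide ((fun item => item.1) a < (fun item => item.1) b)) x acc) =
      (fun acc x => PySem.List.insertBy pvLt2 x acc) from rfl]
  rw [hmain, List.map_append, pv_map_foldl, pv_map_foldl]
  rfl
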